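-- pv_equiv track=rewrite | github.com/Optiways/padam-rd-technical-test | main.py | is_valid_nextEdge
-- ===== SOURCE A (Python) =====
-- def neighbor(vertices, edges):
--     #returns a dict with a list of neighbors for each vertex
--     adjacency_dict={}
--     for e in edges:
--         adjacency_dict[e[0]]=[]
--         adjacency_dict[e[1]]=[]
--     for e in edges:
--         adjacency_dict[e[0]].append(e[1])
--         adjacency_dict[e[1]].append(e[0])
--
--     return adjacency_dict
--
-- def addEdge(u,v,neighbors,edges):
--     # adds an edge to the graph
--     edges.append((u,v))
--     neighbors[u].append(v)
--     neighbors[v].append(u)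
--
-- def rmvEdge(u, v,neighbors,edges):
--     # deletes an edge from the graph
--     if (u,v) in edges:
--         edges.remove((u,v))
--     elif (v,u) in edges:
--         edges.remove((v,u))
--     neighbors[u].remove(v)
--     neighbors[v].remove(u)
--
-- def DFScount(v, vertices, edges):
--     # Counts the number of reachable vertices from v
--     stack = [v]
--     count = 0
--     visited={v: False for v in range(len(vertices))}
--     neighbors= neighbor(vertices,edges)
--     while stack:
--         current = stack.pop()
--         if not visited[current]:
--             visited[current] = True
--             count += 1
--             for n in neighbors[current]:
--                 if not visited[n]:
--                     stack.append(n)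
--     return count
--
-- def is_valid_nextEdge(u,v,vertices,edges):
--     '''edge u-v is valid in the eulerian path iff it is not a bridge (case 2) or it is the unique possible edge
--     from u (case 1)'''
--     neighbors=neighbor(vertices,edges)
--
--     #case 1
--     if len(neighbors[u])==1: return True
--
--     #case 2
--     else: #Checking that it is not a bridge
--
--         visited={v:False for v in range(len(vertices))}
--
--         count1 = DFScount(u,vertices,edges)
--
--         #Remove edge (u, v) and after removing the edge, count vertices reachable from u
--         rmvEdge(u, v,neighbors,edges)
--         visited={v:False for v in range(len(vertices))}
--
--         count2 = DFScount(u,vertices,edges)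
--
--         #Add the edge back to the graph
--         addEdge(u,v,neighbors,edges)
--
--         #If count1 is greater, then edge (u, v) is a bridge
--         return False if count1 > count2 else True
-- ===== SOURCE B (Python) =====
-- def is_valid_nextEdge(u, v, vertices, edges):
--     # Fixed-point (round-based) reachability instead of an explicit-stack DFS.
--     # Mutates `edges` exactly like the original: in the bridge check it removes the
--     # first occurrence of (u, v) (else (v, u)) and afterwards appends (u, v).
--     deg = 0
--     for a, b in edges:
--         deg += (a == u) + (b == u)
--     if deg == 1:
--         return True
--
--     def reach_count(es):
--         # size of the connected component of u, by saturating a set of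
--         # reached vertices until a full pass adds nothing new
--         reach = {u}
--         while True:
--             nxt = set(reach)
--             for a, b in es:
--                 if a in reach:
--                     nxt.add(b)
--                 if b in reach:
--                     nxt.add(a)
--             if nxt == reach:
--                 return len(reach)
--             reach = nxt
--
--     count1 = reach_count(edges)
--     if (u, v) in edges:
--         edges.remove((u, v))
--     else:
--         edges.remove((v, u))
--     count2 = reach_count(edges)
--     edges.append((u, v))
--     return count1 <= count2
-- ===== Notes on version B (the rewrite author's own statement) =====
-- stated objective: alternative
-- what changed: Replaces the explicit-stack DFS with a range-keyed visited dict (run twice via the neighbor-dict build / rmvEdge / addEdge dance) by a round-based fixed-point saturation of the reached vertex set (repeatedly add all neighbors of reached vertices until a pass adds nothing), and reads the degree of u directly off the edge list instead of building the adjacency dict first.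
-- outside the precondition, e.g. on is_valid_nextEdge(0, 1, [7, 7], [(0, 1), (1, 0), (7, 8)]): A returns True, B returns True
import Mathlib
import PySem

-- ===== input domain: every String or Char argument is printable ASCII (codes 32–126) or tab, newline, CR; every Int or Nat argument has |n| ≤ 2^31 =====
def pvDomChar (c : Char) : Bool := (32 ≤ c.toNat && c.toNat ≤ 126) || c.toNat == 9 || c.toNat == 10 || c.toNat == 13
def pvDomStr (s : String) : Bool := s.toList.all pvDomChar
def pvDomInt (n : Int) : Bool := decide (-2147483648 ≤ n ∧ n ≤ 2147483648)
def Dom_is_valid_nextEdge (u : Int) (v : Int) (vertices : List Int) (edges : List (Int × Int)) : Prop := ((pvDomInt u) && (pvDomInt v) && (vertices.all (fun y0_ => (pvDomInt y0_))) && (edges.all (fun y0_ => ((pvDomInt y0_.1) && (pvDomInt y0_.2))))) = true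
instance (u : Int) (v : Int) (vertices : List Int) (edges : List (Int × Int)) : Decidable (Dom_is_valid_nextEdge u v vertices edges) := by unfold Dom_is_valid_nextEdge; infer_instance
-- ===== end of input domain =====

-- B replaces A's explicit-stack DFS (adjacency dict + range-keyed visited dict) by a round-based
-- fixed-point saturation of the reached vertex set, and reads u's degree straight off the edge list.
-- Side effects: Python A and B mutate `edges` identically inside Pre_ (remove the first (u,v)/(v,u),
-- then append (u,v)); the Lean ports model the RETURN value, so the dead `visited` dicts and the
-- neighbors/edges list mutations (which never influence the returned Bool) are not carried as state.

-- ===== PORT A =====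

-- neighbor(vertices, edges): two passes — keys first (all values []), then append both directions.
def neighborA (vertices : List Int) (edges : List (Int × Int)) : PySem.Dict Int (List Int) :=
  let d := edges.foldl (fun d e => (d.insert e.1 ([] : List Int)).insert e.2 ([] : List Int))
    PySem.Dict.empty
  edges.foldl
    (fun d e => (d.modify e.1 [] (fun l => l ++ [e.2])).modify e.2 [] (fun l => l ++ [e.1])) d

-- termination measure of the while-loop: number of still-False entries of `visited`
def pvFalseCount (d : PySem.Dict Int Bool) : Nat := d.items.countP (fun p => p.2 == false)

theorem countP_false_map_lt (k : Int) :
    ∀ l : List (Int × Bool), l.find? (fun p => p.1 == k) = some (k, false) →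
    (l.map (fun p => if (p.1 == k) = true then (k, true) else p)).countP
        (fun p => p.2 == false) <
      l.countP (fun p => p.2 == false) := by
  intro l
  induction l with
  | nil => intro h; simp at h
  | cons p t ih =>
    intro h
    by_cases hp : (p.1 == k) = true
    · rw [List.find?_cons_of_pos (p := fun p : Int × Bool => p.1 == k) hp] at h
      have hpe : p = (k, false) := by injection h
      subst hpe
      have hmono : (t.map (fun p => if (p.1 == k) = true then (k, true) else p)).countP
          (fun p => p.2 == false) ≤ t.countP (fun p => p.2 == false) := by
        rw [List.countP_map]
        refine List.countP_mono_left ?_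
        intro x _ hx
        by_cases hxk : (x.1 == k) = true <;> simp [Function.comp, hxk] at hx ⊢ <;> simp_all
      simp only [List.map_cons, List.countP_cons, if_pos hp]
      simp only [show (((k : Int), true).2 == false) = false from rfl,
        show (((k : Int), false).2 == false) = true from rfl]
      simp only [if_pos, reduceCtorEq, reduceIte]
      omega
    · rw [List.find?_cons_of_neg (p := fun p : Int × Bool => p.1 == k) (by simpa using hp)] at h
      have := ih h
      simp only [List.map_cons, if_neg hp, List.countP_cons]
      omega

theorem pvFalseCount_insert_lt (d : PySem.Dict Int Bool) (k : Int)
    (h : d.getD k true = false) :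
    pvFalseCount (d.insert k true) < pvFalseCount d := by
  have hg : d.get? k = some false := by
    unfold PySem.Dict.getD at h
    cases hx : d.get? k with
    | none => rw [hx] at h; simp at h
    | some b => rw [hx] at h; cases b <;> simp_all
  have hfind : d.items.find? (fun p => p.1 == k) = some (k, false) := by
    unfold PySem.Dict.get? at hg
    cases hx : d.items.find? (fun p => p.1 == k) with
    | none => rw [hx] at hg; simp at hg
    | some p =>
      rw [hx] at hg
      have h1 : (p.1 == k) = true := List.find?_some (p := fun q : Int × Bool => q.1 == k) hx
      have h2 : p.2 = false := by simpa using hg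
      have h1' : p.1 = k := by simpa using h1
      rw [show p = (k, false) by rw [← h1', ← h2]]
  have hc : d.contains k = true := by
    unfold PySem.Dict.contains
    rw [List.any_eq_true]
    exact ⟨(k, false), List.mem_of_find?_eq_some hfind, by simp⟩
  rw [pvFalseCount, pvFalseCount, PySem.Dict.items_insert_of_contains d true hc]
  exact countP_false_map_lt k d.items hfind

-- the `while stack:` loop of DFScount; visited[x]/neighbors[x] lookups are getD with a default
-- that is only reached where Python raises KeyError (excluded by Pre_): a missing visited key
-- reads as True (vertex skipped / not pushed), a missing neighbors key as [].
def dfsLoopA (nbrs : PySem.Dict Int (List Int)) (stack : List Int) (count : Int)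
    (visited : PySem.Dict Int Bool) : Int :=
  match hs : stack.getLast? with
  | none => count
  | some current =>
    if hv : visited.getD current true then
      dfsLoopA nbrs stack.dropLast count visited
    else
      let visited' := visited.insert current true
      dfsLoopA nbrs
        (stack.dropLast ++ (nbrs.getD current []).filter (fun n => !(visited'.getD n true)))
        (count + 1) visited'
termination_by (pvFalseCount visited, stack.length)
decreasing_by
  · have : stack ≠ [] := by
      intro h; rw [h] at hs; simp at hs
    right
    have h0 : 0 < stack.length := List.length_pos_of_ne_nil this
    simp only [List.length_dropLast]; omega
  · left
    exact pvFalseCount_insert_lt visited current (by simpa using hv)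

def DFScountA (s : Int) (vertices : List Int) (edges : List (Int × Int)) : Int :=
  let visited := (PySem.List.pyRange 0 (vertices.length : Int) 1).foldl
    (fun d k => d.insert k false) PySem.Dict.empty
  dfsLoopA (neighborA vertices edges) [s] 0 visited

def is_valid_nextEdge (u : Int) (v : Int) (vertices : List Int) (edges : List (Int × Int)) : Bool :=
  let neighbors := neighborA vertices edges
  -- case 1: len(neighbors[u]) == 1  (neighbors[u] = getD; missing key raises, excluded by Pre_)
  if (neighbors.getD u []).length == 1 then true
  else
    -- case 2: bridge check; rmvEdge's effect on the edges list (first (u,v), else first (v,u))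
    let count1 := DFScountA u vertices edges
    let edges' := if (u, v) ∈ edges then edges.erase (u, v)
                  else if (v, u) ∈ edges then edges.erase (v, u) else edges
    let count2 := DFScountA u vertices edges'
    if count1 > count2 then false else true

-- ===== PORT B =====

-- one saturation round: nxt = set(reach); for (a,b) in es: if a in reach: nxt.add(b); if b in reach: nxt.add(a)
def roundB (es : List (Int × Int)) (reach : PySem.Set Int) : PySem.Set Int :=
  es.foldl (fun nxt e =>
    let nxt1 := if reach.contains e.1 then nxt.add e.2 else nxt
    if reach.contains e.2 then nxt1.add e.1 else nxt1) (PySem.Set.ofList reach)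

-- the `while True` loop; the fuel only makes the recursion total, 2*len(es)+2 rounds always
-- suffice to hit the fixed point (proved below), so the fuel-exhausted branch is never taken.
def reachLoopB (es : List (Int × Int)) : Nat → PySem.Set Int → Int
  | 0, reach => PySem.Set.len reach
  | fuel + 1, reach =>
    let nxt := roundB es reach
    if nxt.equal reach then PySem.Set.len reach
    else reachLoopB es fuel nxt

def reachCountB (u : Int) (es : List (Int × Int)) : Int :=
  reachLoopB es (2 * es.length + 2) (PySem.Set.ofList [u])

def is_valid_nextEdge_alt (u : Int) (v : Int) (vertices : List Int) (edges : List (Int × Int)) : Bool :=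
  let deg := edges.foldl
    (fun acc e => acc + (if e.1 == u then 1 else 0) + (if e.2 == u then 1 else 0)) (0 : Int)
  if deg == 1 then true
  else
    let count1 := reachCountB u edges
    -- edges.remove: first (u, v) if present, else (v, u) (ValueError when absent = outside Pre_;
    -- List.erase of an absent element is the identity there)
    let edges' := if (u, v) ∈ edges then edges.erase (u, v) else edges.erase (v, u)
    let count2 := reachCountB u edges'
    decide (count1 ≤ count2)

-- ===== PRECONDITION & SPEC =====

-- degree of u in the edge list, self-loops counted twice (= len(neighbor(...)[u]) in A)
def degE (u : Int) (edges : List (Int × Int)) : Nat :=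
  edges.countP (fun e => e.1 == u) + edges.countP (fun e => e.2 == u)

-- Pre_ excludes the inputs where A raises (KeyError/ValueError): u not an endpoint of any edge, a
-- bridge check with neither (u,v) nor (v,u) present in edges, a self-loop bridge check that leaves u
-- edgeless, or an edge endpoint outside range(len(vertices)); requiring ALL endpoints in range (not
-- only the reachable ones) also drops the few inputs whose out-of-range endpoints lie in a component
-- away from u, on which A returns (and B returns the same value).
def Pre_is_valid_nextEdge (u : Int) (v : Int) (vertices : List Int) (edges : List (Int × Int)) : Prop :=
  (∃ e ∈ edges, e.1 = u ∨ e.2 = u) ∧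
  (degE u edges ≠ 1 →
    (∀ e ∈ edges, 0 ≤ e.1 ∧ e.1 < (vertices.length : Int) ∧ 0 ≤ e.2 ∧ e.2 < (vertices.length : Int)) ∧
    ((u, v) ∈ edges ∨ (v, u) ∈ edges) ∧
    (u = v → 3 ≤ degE u edges))
instance (u : Int) (v : Int) (vertices : List Int) (edges : List (Int × Int)) :
    Decidable (Pre_is_valid_nextEdge u v vertices edges) := by
  unfold Pre_is_valid_nextEdge; infer_instance

def pvWitness_is_valid_nextEdge : Int × Int × List Int × (List (Int × Int)) :=
  (0, 1, [7, 7], [(0, 1), (1, 0)])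

def Spec_is_valid_nextEdge (u : Int) (v : Int) (vertices : List Int) (edges : List (Int × Int)) (out : Bool) : Prop := out = is_valid_nextEdge_alt u v vertices edges
instance (u : Int) (v : Int) (vertices : List Int) (edges : List (Int × Int)) (out : Bool) : Decidable (Spec_is_valid_nextEdge u v vertices edges out) := by unfold Spec_is_valid_nextEdge; infer_instance

-- ===== CLAIM (what is proved, stated in full; the proofs are below) =====
def Claim_equal_is_valid_nextEdge : Prop := ∀ (u : Int) (v : Int) (vertices : List Int) (edges : List (Int × Int)), Dom_is_valid_nextEdge u v vertices edges → Pre_is_valid_nextEdge u v vertices edges → Spec_is_valid_nextEdge u v vertices edges (is_valid_nextEdge u v vertices edges)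

-- ===== LEMMAS AND PROOFS =====

-- the symmetric adjacency relation and reachability of the multigraph `es`
def adjP (es : List (Int × Int)) (x y : Int) : Prop := (x, y) ∈ es ∨ (y, x) ∈ es
def reachP (es : List (Int × Int)) (s x : Int) : Prop := Relation.ReflTransGen (adjP es) s x

-- both directed copies of every edge, in A's insertion order
def pairsE (es : List (Int × Int)) : List (Int × Int) :=
  es.flatMap (fun e => [(e.1, e.2), (e.2, e.1)])

theorem foldl_modify_pairsE (l : List (Int × Int)) (d : PySem.Dict Int (List Int)) :
    l.foldl (fun d e =>
        (d.modify e.1 [] (fun t => t ++ [e.2])).modify e.2 [] (fun t => t ++ [e.1])) d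
      = (pairsE l).foldl (fun d p => d.modify p.1 [] (fun t => t ++ [p.2])) d := by
  induction l generalizing d with
  | nil => rfl
  | cons e t ih =>
    simp only [pairsE, List.flatMap_cons, List.foldl_append, List.foldl_cons, List.foldl_nil]
    exact ih _

theorem baseDict_getD (es : List (Int × Int)) (x : Int) :
    (es.foldl (fun d e => (d.insert e.1 ([] : List Int)).insert e.2 ([] : List Int))
      PySem.Dict.empty).getD x [] = [] := by
  have h : ∀ d : PySem.Dict Int (List Int), (∀ y, d.getD y [] = []) →
      ∀ x, (es.foldl (fun d e => (d.insert e.1 ([] : List Int)).insert e.2 ([] : List Int))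
        d).getD x [] = [] := by
    induction es with
    | nil => intro d hd x; exact hd x
    | cons e t ih =>
      intro d hd x
      refine ih _ (fun y => ?_) x
      rw [PySem.Dict.getD_insert, PySem.Dict.getD_insert]
      split_ifs <;> simp [hd]
  exact h PySem.Dict.empty (fun y => by simp [pysem]) x

theorem neighborA_getD (vertices : List Int) (es : List (Int × Int)) (x : Int) :
    (neighborA vertices es).getD x [] =
      ((pairsE es).filter (fun p => p.1 == x)).map (fun p => p.2) := by
  unfold neighborA
  rw [foldl_modify_pairsE, PySem.Dict.getD_foldl_modify_append, baseDict_getD]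
  simp

theorem mem_neighborA (vertices : List Int) (es : List (Int × Int)) (x y : Int) :
    y ∈ (neighborA vertices es).getD x [] ↔ adjP es x y := by
  rw [neighborA_getD]
  simp only [List.mem_map, List.mem_filter, pairsE, List.mem_flatMap, List.mem_cons,
    List.not_mem_nil, or_false, adjP, beq_iff_eq]
  constructor
  · rintro ⟨p, ⟨⟨e, he, hp⟩, hpk⟩, rfl⟩
    rcases hp with rfl | rfl
    · exact Or.inl (by simpa [← hpk] using he)
    · exact Or.inr (by simpa [← hpk] using he)
  · rintro (h | h)
    · exact ⟨(x, y), ⟨⟨(x, y), h, Or.inl rfl⟩, rfl⟩, rfl⟩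
    · exact ⟨(x, y), ⟨⟨(y, x), h, Or.inr rfl⟩, rfl⟩, rfl⟩

theorem countP_pairsE (es : List (Int × Int)) (x : Int) :
    (pairsE es).countP (fun p => p.1 == x) = degE x es := by
  induction es with
  | nil => rfl
  | cons e t ih =>
    simp only [pairsE, List.flatMap_cons, List.countP_append, List.countP_cons,
      List.countP_nil, degE] at *
    split_ifs <;> simp_all <;> omega

theorem length_neighborA (vertices : List Int) (es : List (Int × Int)) (x : Int) :
    ((neighborA vertices es).getD x []).length = degE x es := by
  rw [neighborA_getD, List.length_map, ← List.countP_eq_length_filter, countP_pairsE]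

theorem get?_false_find (d : PySem.Dict Int Bool) (k : Int) (h : d.get? k = some false) :
    d.items.find? (fun p => p.1 == k) = some (k, false) := by
  unfold PySem.Dict.get? at h
  cases hx : d.items.find? (fun p => p.1 == k) with
  | none => rw [hx] at h; simp at h
  | some p =>
    rw [hx] at h
    have h1 : (p.1 == k) = true := List.find?_some (p := fun q : Int × Bool => q.1 == k) hx
    have h2 : p.2 = false := by simpa using h
    have h1' : p.1 = k := by simpa using h1
    rw [show p = (k, false) by rw [← h1', ← h2]]

theorem countP_true_map_eq (k : Int) :
    ∀ l : List (Int × Bool), (l.map (fun p => p.1)).Nodup →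
    l.find? (fun p => p.1 == k) = some (k, false) →
    (l.map (fun p => if (p.1 == k) = true then (k, true) else p)).countP
        (fun p => p.2 == true)
      = l.countP (fun p => p.2 == true) + 1 := by
  intro l
  induction l with
  | nil => intro _ h; simp at h
  | cons p t ih =>
    intro hnd h
    simp only [List.map_cons, List.nodup_cons] at hnd
    by_cases hp : (p.1 == k) = true
    · rw [List.find?_cons_of_pos (p := fun p : Int × Bool => p.1 == k) hp] at h
      have hpe : p = (k, false) := by injection h
      subst hpe
      have hkt : ∀ q ∈ t, ((q.1 == k) = true) → False := by
        intro q hq hqk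
        exact hnd.1 (List.mem_map.2 ⟨q, hq, by simpa using hqk⟩)
      have ht : t.map (fun p => if (p.1 == k) = true then (k, true) else p) = t := by
        rw [show t = t.map id by simp]
        rw [List.map_map]
        refine List.map_congr_left ?_
        intro a ha
        simp only [Function.comp, id]
        rw [if_neg (fun hc => hkt a (by simpa using ha) hc)]
      simp only [List.map_cons, if_pos hp, ht, List.countP_cons]
      simp only [show (((k : Int), true).2 == true) = true from rfl,
        show (((k : Int), false).2 == true) = false from rfl]
      norm_num
    · rw [List.find?_cons_of_neg (p := fun p : Int × Bool => p.1 == k)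
        (by simpa using hp)] at h
      simp only [List.map_cons, if_neg hp, List.countP_cons]
      rw [ih hnd.2 h]
      omega

theorem countP_true_insert (d : PySem.Dict Int Bool) (k : Int) (hnd : d.keys.Nodup)
    (h : d.get? k = some false) :
    (d.insert k true).items.countP (fun p => p.2 == true)
      = d.items.countP (fun p => p.2 == true) + 1 := by
  have hfind := get?_false_find d k h
  have hc : d.contains k = true := by
    unfold PySem.Dict.contains
    rw [List.any_eq_true]
    exact ⟨(k, false), List.mem_of_find?_eq_some hfind, by simp⟩
  rw [PySem.Dict.items_insert_of_contains d true hc]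
  exact countP_true_map_eq k d.items hnd hfind

theorem dfsLoopA_eq_nil (nbrs : PySem.Dict Int (List Int)) (stack : List Int) (count : Int)
    (V : PySem.Dict Int Bool) (h : stack.getLast? = none) :
    dfsLoopA nbrs stack count V = count := by
  rw [dfsLoopA.eq_def]; split <;> simp_all

theorem dfsLoopA_eq_skip (nbrs : PySem.Dict Int (List Int)) (stack : List Int) (count : Int)
    (V : PySem.Dict Int Bool) (current : Int) (h : stack.getLast? = some current)
    (hv : V.getD current true = true) :
    dfsLoopA nbrs stack count V = dfsLoopA nbrs stack.dropLast count V := by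
  rw [dfsLoopA.eq_def]
  split
  · simp_all
  · rename_i cur heq
    rw [h] at heq
    injection heq with heq
    subst heq
    rw [dif_pos hv]

theorem dfsLoopA_eq_visit (nbrs : PySem.Dict Int (List Int)) (stack : List Int) (count : Int)
    (V : PySem.Dict Int Bool) (current : Int) (h : stack.getLast? = some current)
    (hv : ¬ V.getD current true = true) :
    dfsLoopA nbrs stack count V =
      dfsLoopA nbrs
        (stack.dropLast ++
          (nbrs.getD current []).filter (fun n => !((V.insert current true).getD n true)))
        (count + 1) (V.insert current true) := by
  rw [dfsLoopA.eq_def]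
  split
  · simp_all
  · rename_i cur heq
    rw [h] at heq
    injection heq with heq
    subst heq
    rw [dif_neg hv]

theorem dfsLoopA_spec (es : List (Int × Int)) (s : Int) (rng : List Int)
    (nbrs : PySem.Dict Int (List Int))
    (Hnbr : ∀ x y, y ∈ nbrs.getD x [] ↔ adjP es x y)
    (Hrng : ∀ x, reachP es s x → x ∈ rng) :
    ∀ (stack : List Int) (count : Int) (V : PySem.Dict Int Bool),
    V.keys.Nodup →
    (∀ x, (V.get? x).isSome = true ↔ x ∈ rng) →
    (∀ x, V.get? x = some true → reachP es s x) →
    (∀ x ∈ stack, reachP es s x) →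
    (∀ x, V.get? x = some true → ∀ y, adjP es x y → V.get? y = some true ∨ y ∈ stack) →
    (s ∈ stack ∨ V.get? s = some true) →
    count = (V.items.countP (fun p => p.2 == true) : Int) →
    ∃ L : List Int, L.Nodup ∧ (∀ x, x ∈ L ↔ reachP es s x) ∧
      dfsLoopA nbrs stack count V = (L.length : Int) := by
  intro stack count V
  induction stack, count, V using dfsLoopA.induct (nbrs := nbrs) with
  | case1 stack count V hs =>
    intro hnd hkeys hT hS hcl hstart hc
    have hstack : stack = [] := by
      cases stack with
      | nil => rfl
      | cons a t => simp at hs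
    subst hstack
    have hs' : V.get? s = some true := by
      rcases hstart with h | h
      · simp at h
      · exact h
    have hclosed : ∀ x, reachP es s x → V.get? x = some true := by
      intro x hx
      induction hx with
      | refl => exact hs'
      | tail hab hbc ih =>
        rcases hcl _ ih _ hbc with h | h
        · exact h
        · simp at h
    refine ⟨(V.items.filter (fun p => p.2 == true)).map (fun p => p.1), ?_, ?_, ?_⟩
    · have hnd' : (V.items.map (fun p => p.1)).Nodup := hnd
      exact (List.Sublist.map _ List.filter_sublist).nodup hnd'
    · intro x
      simp only [List.mem_map, List.mem_filter]
      constructor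
      · rintro ⟨p, ⟨hp, hp2⟩, rfl⟩
        have hp2' : p.2 = true := by simpa using hp2
        have hpm : (p.1, true) ∈ V.items := by rw [← hp2']; simpa using hp
        exact hT p.1 ((PySem.Dict.get?_eq_some_iff_mem_items V p.1 true hnd).2 hpm)
      · intro hx
        have h2 : (x, true) ∈ V.items :=
          (PySem.Dict.get?_eq_some_iff_mem_items V x true hnd).1 (hclosed x hx)
        exact ⟨(x, true), ⟨h2, rfl⟩, rfl⟩
    · rw [dfsLoopA_eq_nil _ _ _ _ hs, hc, List.length_map, ← List.countP_eq_length_filter]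
  | case2 stack count V current hs hv ih =>
    intro hnd hkeys hT hS hcl hstart hc
    have hne : stack ≠ [] := by intro h; rw [h] at hs; simp at hs
    have hglast : stack.getLast hne = current := by
      have h2 := List.getLast?_eq_some_getLast hne
      rw [hs] at h2
      injection h2 with h2
      exact h2.symm
    have hdecomp : stack.dropLast ++ [current] = stack := by
      rw [← hglast]; exact List.dropLast_append_getLast hne
    have hmem : ∀ x ∈ stack, x ∈ stack.dropLast ∨ x = current := by
      intro x hx; rw [← hdecomp] at hx; simpa using hx
    have hcur : current ∈ stack := by rw [← hdecomp]; simp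
    have hcurT : V.get? current = some true := by
      have hrng : current ∈ rng := Hrng current (hS current hcur)
      have hsome : (V.get? current).isSome = true := (hkeys current).2 hrng
      cases hx : V.get? current with
      | none => rw [hx] at hsome; simp at hsome
      | some b =>
        have : V.getD current true = b := by rw [PySem.Dict.getD_eq_get?_getD, hx]; rfl
        rw [hv] at this; rw [← this]
    rw [dfsLoopA_eq_skip _ _ _ _ _ hs hv]
    refine ih hnd hkeys hT ?_ ?_ ?_ hc
    · exact fun x hx => hS x ((List.dropLast_sublist _).subset hx)
    · intro x hx y hy
      rcases hcl x hx y hy with h | h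
      · exact Or.inl h
      · rcases hmem y h with h' | h'
        · exact Or.inr h'
        · exact Or.inl (h' ▸ hcurT)
    · rcases hstart with h | h
      · rcases hmem s h with h' | h'
        · exact Or.inl h'
        · exact Or.inr (h' ▸ hcurT)
      · exact Or.inr h
  | case3 stack count V current hs hv vis' ih =>
    intro hnd hkeys hT hS hcl hstart hc
    have hne : stack ≠ [] := by intro h; rw [h] at hs; simp at hs
    have hglast : stack.getLast hne = current := by
      have h2 := List.getLast?_eq_some_getLast hne
      rw [hs] at h2
      injection h2 with h2
      exact h2.symm
    have hdecomp : stack.dropLast ++ [current] = stack := by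
      rw [← hglast]; exact List.dropLast_append_getLast hne
    have hmem : ∀ x ∈ stack, x ∈ stack.dropLast ∨ x = current := by
      intro x hx; rw [← hdecomp] at hx; simpa using hx
    have hcur : current ∈ stack := by rw [← hdecomp]; simp
    have hreachcur : reachP es s current := hS current hcur
    have hgf : V.get? current = some false := by
      cases hx : V.get? current with
      | none =>
        exfalso; apply hv
        rw [PySem.Dict.getD_eq_get?_getD, hx]; rfl
      | some b =>
        cases b
        · rfl
        · exfalso; apply hv; rw [PySem.Dict.getD_eq_get?_getD, hx]; rfl
    have hcont : V.contains current = true := by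
      unfold PySem.Dict.contains
      rw [List.any_eq_true]
      exact ⟨(current, false), List.mem_of_find?_eq_some (get?_false_find V current hgf), by simp⟩
    have hg' : ∀ x, (V.insert current true).get? x =
        if x = current then some true else V.get? x := fun x => PySem.Dict.get?_insert V current x true
    rw [dfsLoopA_eq_visit _ _ _ _ _ hs hv]
    refine ih ?_ ?_ ?_ ?_ ?_ ?_ ?_
    · rw [PySem.Dict.keys_insert_of_contains V true hcont]; exact hnd
    · intro x
      rw [hg']
      split_ifs with hxc
      · subst hxc
        simpa using Hrng x hreachcur
      · exact hkeys x
    · intro x hx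
      rw [hg'] at hx
      split_ifs at hx with hxc
      · exact hxc ▸ hreachcur
      · exact hT x hx
    · intro x hx
      rcases List.mem_append.1 hx with h | h
      · exact hS x ((List.dropLast_sublist _).subset h)
      · have := (List.mem_filter.1 h).1
        exact Relation.ReflTransGen.tail hreachcur ((Hnbr current x).1 this)
    · intro x hx y hy
      rw [hg'] at hx
      by_cases hxc : x = current
      · subst hxc
        have hyn : y ∈ nbrs.getD x [] := (Hnbr x y).2 hy
        by_cases hyv : (V.insert x true).getD y true = true
        · left
          have hyr : reachP es s y := Relation.ReflTransGen.tail hreachcur hy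
          have hsome : ((V.insert x true).get? y).isSome = true := by
            rw [hg']
            split_ifs with h
            · rfl
            · exact (hkeys y).2 (Hrng y hyr)
          cases hz : (V.insert x true).get? y with
          | none => rw [hz] at hsome; simp at hsome
          | some b =>
            have : (V.insert x true).getD y true = b := by
              rw [PySem.Dict.getD_eq_get?_getD, hz]; rfl
            rw [hyv] at this; rw [← this]
        · right
          refine List.mem_append.2 (Or.inr (List.mem_filter.2 ⟨hyn, ?_⟩))
          simpa using hyv
      · rw [if_neg hxc] at hx
        rcases hcl x hx y hy with h | h
        · left; rw [hg']; split_ifs with h'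
          · rfl
          · exact h
        · rcases hmem y h with h' | h'
          · exact Or.inr (List.mem_append.2 (Or.inl h'))
          · left; rw [hg', if_pos h']
    · rcases hstart with h | h
      · rcases hmem s h with h' | h'
        · exact Or.inl (List.mem_append.2 (Or.inl h'))
        · right; rw [hg', if_pos h']
      · right; rw [hg']; split_ifs with h'
        · rfl
        · exact h
    · rw [countP_true_insert V current hnd hgf]
      push_cast
      rw [← hc]

theorem DFScountA_spec (s : Int) (vertices : List Int) (es : List (Int × Int))
    (hrange : ∀ e ∈ es, 0 ≤ e.1 ∧ e.1 < (vertices.length : Int) ∧ 0 ≤ e.2 ∧ e.2 < (vertices.length : Int))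
    (hs : ∃ e ∈ es, e.1 = s ∨ e.2 = s) :
    ∃ L : List Int, L.Nodup ∧ (∀ x, x ∈ L ↔ reachP es s x) ∧
      DFScountA s vertices es = (L.length : Int) := by
  have hfold : ∀ (l : List Int) (d : PySem.Dict Int Bool) (x : Int),
      (l.foldl (fun d k => d.insert k false) d).get? x =
        if x ∈ l then some false else d.get? x := by
    intro l
    induction l with
    | nil => intro d x; simp
    | cons k t ih =>
      intro d x
      rw [List.foldl_cons, ih]
      by_cases hx : x ∈ t <;> by_cases hk : x = k <;>
        simp [List.mem_cons, hx, hk, PySem.Dict.get?_insert]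
  set rng := PySem.List.pyRange 0 (vertices.length : Int) 1 with hrngdef
  set V0 : PySem.Dict Int Bool :=
    rng.foldl (fun d k => d.insert k false) PySem.Dict.empty with hV0
  have hg : ∀ x, V0.get? x = if x ∈ rng then some false else none := by
    intro x; rw [hV0, hfold]; simp [pysem]
  have hndV0 : V0.keys.Nodup :=
    PySem.Dict.nodup_keys_foldl_insert rng (fun _ _ => false) PySem.Dict.empty
      PySem.Dict.nodup_keys_empty
  have hrng : ∀ x, reachP es s x → x ∈ rng := by
    intro x hx
    induction hx with
    | refl =>
      obtain ⟨e, he, h⟩ := hs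
      have := hrange e he
      rcases h with h | h <;> rw [← h] <;> rw [hrngdef] <;>
        exact PySem.List.mem_pyRange_one.2 (by omega)
    | tail hab hbc ih =>
      rcases hbc with h | h
      · have := hrange _ h
        rw [hrngdef]; exact PySem.List.mem_pyRange_one.2 (by omega)
      · have := hrange _ h
        rw [hrngdef]; exact PySem.List.mem_pyRange_one.2 (by omega)
  have hzero : V0.items.countP (fun p => p.2 == true) = 0 := by
    rw [List.countP_eq_zero]
    intro p hp
    have hgp : V0.get? p.1 = some p.2 :=
      (PySem.Dict.get?_eq_some_iff_mem_items V0 p.1 p.2 hndV0).2 (by simpa using hp)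
    rw [hg p.1] at hgp
    split_ifs at hgp with h
    · have : p.2 = false := by simpa using hgp.symm
      simp [this]
  have := dfsLoopA_spec es s rng (neighborA vertices es)
    (fun x y => mem_neighborA vertices es x y) hrng [s] 0 V0
    hndV0
    (by intro x; rw [hg]; split_ifs with h <;> simp [h])
    (by intro x hx; rw [hg] at hx; split_ifs at hx <;> simp at hx)
    (by intro x hx
        have : x = s := by simpa using hx
        exact this ▸ Relation.ReflTransGen.refl)
    (by intro x hx; rw [hg] at hx; split_ifs at hx <;> simp at hx)
    (Or.inl (by simp))
    (by rw [hzero]; rfl)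
  exact this

theorem roundB_mem_gen (es : List (Int × Int)) (reach : PySem.Set Int) :
    ∀ (acc : List Int) (x : Int),
    x ∈ es.foldl (fun nxt e =>
      let nxt1 := if reach.contains e.1 then PySem.Set.add nxt e.2 else nxt
      if reach.contains e.2 then PySem.Set.add nxt1 e.1 else nxt1) acc ↔
    x ∈ acc ∨ ∃ e ∈ es, (e.1 ∈ reach ∧ x = e.2) ∨ (e.2 ∈ reach ∧ x = e.1) := by
  induction es with
  | nil => intro acc x; simp
  | cons e t ih =>
    intro acc x
    rw [List.foldl_cons, ih]
    have hc1 : (PySem.Set.contains reach e.1 = true) ↔ e.1 ∈ reach := by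
      simp [PySem.Set.contains]
    have hc2 : (PySem.Set.contains reach e.2 = true) ↔ e.2 ∈ reach := by
      simp [PySem.Set.contains]
    by_cases h1 : e.1 ∈ reach <;> by_cases h2 : e.2 ∈ reach <;>
      simp [PySem.Set.contains, PySem.Set.mem_add, h1, h2, List.mem_cons] <;> simp [or_assoc]

theorem roundB_mem (es : List (Int × Int)) (reach : PySem.Set Int) (x : Int) :
    x ∈ roundB es reach ↔ x ∈ reach ∨ ∃ y ∈ reach, adjP es y x := by
  unfold roundB
  rw [roundB_mem_gen]
  rw [PySem.Set.mem_ofList]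
  constructor
  · rintro (h | ⟨e, he, ⟨hy, rfl⟩ | ⟨hy, rfl⟩⟩)
    · exact Or.inl h
    · exact Or.inr ⟨e.1, hy, Or.inl (by simpa using he)⟩
    · exact Or.inr ⟨e.2, hy, Or.inr (by simpa using he)⟩
  · rintro (h | ⟨y, hy, h | h⟩)
    · exact Or.inl h
    · exact Or.inr ⟨(y, x), h, Or.inl ⟨hy, rfl⟩⟩
    · exact Or.inr ⟨(x, y), h, Or.inr ⟨hy, rfl⟩⟩

theorem prefix_add (s : PySem.Set Int) (x : Int) : s <+: s.add x := by
  unfold PySem.Set.add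
  split
  · exact List.prefix_refl _
  · exact List.prefix_append _ _

theorem roundB_prefix (es : List (Int × Int)) (reach : PySem.Set Int) :
    ∀ acc : List Int, acc <+: es.foldl (fun nxt e =>
      let nxt1 := if reach.contains e.1 then PySem.Set.add nxt e.2 else nxt
      if reach.contains e.2 then PySem.Set.add nxt1 e.1 else nxt1) acc := by
  induction es with
  | nil => intro acc; exact List.prefix_refl _
  | cons e t ih =>
    intro acc
    rw [List.foldl_cons]
    refine List.IsPrefix.trans ?_ (ih _)
    have s1 : acc <+:
        (if PySem.Set.contains reach e.1 = true then PySem.Set.add acc e.2 else acc) := by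
      split
      · exact prefix_add acc e.2
      · exact List.prefix_refl _
    have s2 : ∀ b : List Int, b <+:
        (if PySem.Set.contains reach e.2 = true then PySem.Set.add b e.1 else b) := by
      intro b; split
      · exact prefix_add b e.1
      · exact List.prefix_refl _
    exact s1.trans (s2 _)

theorem roundB_nodup (es : List (Int × Int)) (reach : PySem.Set Int) :
    ∀ acc : List Int, acc.Nodup → (es.foldl (fun nxt e =>
      let nxt1 := if reach.contains e.1 then PySem.Set.add nxt e.2 else nxt
      if reach.contains e.2 then PySem.Set.add nxt1 e.1 else nxt1) acc).Nodup := by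
  induction es with
  | nil => exact fun acc h => h
  | cons e t ih =>
    intro acc h
    rw [List.foldl_cons]
    refine ih _ ?_
    have h1 : (if PySem.Set.contains reach e.1 = true
        then PySem.Set.add acc e.2 else acc).Nodup := by
      split
      · exact PySem.Set.nodup_add _ _ h
      · exact h
    have h2 : (if PySem.Set.contains reach e.2 = true
        then PySem.Set.add (if PySem.Set.contains reach e.1 = true
          then PySem.Set.add acc e.2 else acc) e.1
        else (if PySem.Set.contains reach e.1 = true
          then PySem.Set.add acc e.2 else acc)).Nodup := by
      split
      · exact PySem.Set.nodup_add _ _ h1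
      · exact h1
    exact h2

theorem ofList_eq_self (l : List Int) (h : l.Nodup) : PySem.Set.ofList l = l := by
  have gen : ∀ (t s : List Int), (s ++ t).Nodup → t.foldl PySem.Set.add s = s ++ t := by
    intro t
    induction t with
    | nil => intro s _; simp
    | cons k r ih =>
      intro s hnd
      rw [List.foldl_cons]
      have hk : k ∉ s := by
        intro hks
        have := List.disjoint_of_nodup_append hnd
        exact this hks (by simp)
      have hadd : PySem.Set.add s k = s ++ [k] := by
        unfold PySem.Set.add
        rw [if_neg]
        simp only [PySem.Set.contains]
        simpa using hk
      rw [hadd, ih (s ++ [k]) (by simpa using hnd)]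
      simp
  have := gen l [] (by simpa using h)
  simpa [PySem.Set.ofList] using this

theorem roundB_grow (es : List (Int × Int)) (reach : PySem.Set Int) (hnd : reach.Nodup)
    (hne : ¬ (roundB es reach).equal reach = true) :
    reach.length + 1 ≤ (roundB es reach).length := by
  have hpre : reach <+: roundB es reach := by
    unfold roundB
    rw [ofList_eq_self reach hnd]
    exact roundB_prefix es reach reach
  obtain ⟨rest, hrest⟩ := hpre
  cases rest with
  | nil =>
    exfalso
    apply hne
    rw [PySem.Set.equal_iff]
    intro x
    rw [← hrest]
    simp
  | cons a r =>
    rw [← hrest, List.length_append, List.length_cons]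
    omega

-- all vertices a saturation round can ever add: u and the edge endpoints
def candL (u : Int) (es : List (Int × Int)) : List Int :=
  u :: es.flatMap (fun e => [e.1, e.2])

theorem reach_sub_cand (u : Int) (es : List (Int × Int)) (x : Int) (h : reachP es u x) :
    x ∈ candL u es := by
  induction h with
  | refl => exact List.mem_cons_self ..
  | tail hab hbc ih =>
    rcases hbc with h | h
    · exact List.mem_cons_of_mem _ (List.mem_flatMap.2 ⟨_, h, by simp⟩)
    · exact List.mem_cons_of_mem _ (List.mem_flatMap.2 ⟨_, h, by simp⟩)

theorem nodup_length_le_cand (l cand : List Int) (hnd : l.Nodup) (h : ∀ x ∈ l, x ∈ cand) :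
    l.length ≤ cand.length := by
  calc l.length = l.toFinset.card := (List.toFinset_card_of_nodup hnd).symm
    _ ≤ cand.toFinset.card := Finset.card_le_card (by
        intro x hx
        rw [List.mem_toFinset] at *
        exact h x (by simpa using hx))
    _ ≤ cand.length := List.toFinset_card_le _

theorem length_candL (u : Int) (es : List (Int × Int)) :
    (candL u es).length = 2 * es.length + 1 := by
  unfold candL
  induction es with
  | nil => rfl
  | cons e t ih => simp_all [List.flatMap_cons]; omega

theorem reachLoopB_spec (u : Int) (es : List (Int × Int)) :
    ∀ (fuel : Nat) (reach : PySem.Set Int),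
    reach.Nodup → u ∈ reach → (∀ x ∈ reach, reachP es u x) →
    (candL u es).length + 1 ≤ fuel + reach.length →
    ∃ L : List Int, L.Nodup ∧ (∀ x, x ∈ L ↔ reachP es u x) ∧
      reachLoopB es fuel reach = (L.length : Int) := by
  intro fuel
  induction fuel with
  | zero =>
    intro reach hnd hu hsub hbound
    exfalso
    have : reach.length ≤ (candL u es).length :=
      nodup_length_le_cand reach (candL u es) hnd
        (fun x hx => reach_sub_cand u es x (hsub x hx))
    omega
  | succ fuel ih =>
    intro reach hnd hu hsub hbound
    simp only [reachLoopB]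
    by_cases heq : (roundB es reach).equal reach = true
    · rw [if_pos heq]
      have hcl : ∀ x ∈ reach, ∀ y, adjP es x y → y ∈ reach := by
        intro x hx y hy
        have : y ∈ roundB es reach := (roundB_mem es reach y).2 (Or.inr ⟨x, hx, hy⟩)
        exact (PySem.Set.equal_iff _ _).1 heq y |>.1 this
      refine ⟨reach, hnd, ?_, rfl⟩
      intro x
      constructor
      · exact hsub x
      · intro hx
        induction hx with
        | refl => exact hu
        | tail hab hbc ih2 => exact hcl _ ih2 _ hbc
    · rw [if_neg heq]
      refine ih (roundB es reach) (roundB_nodup es reach _ (PySem.Set.nodup_ofList reach))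
        ((roundB_mem es reach u).2 (Or.inl hu)) ?_ ?_
      · intro x hx
        rcases (roundB_mem es reach x).1 hx with h | ⟨y, hy, h⟩
        · exact hsub x h
        · exact Relation.ReflTransGen.tail (hsub y hy) h
      · have := roundB_grow es reach hnd heq
        omega

theorem reachCountB_spec (u : Int) (es : List (Int × Int)) :
    ∃ L : List Int, L.Nodup ∧ (∀ x, x ∈ L ↔ reachP es u x) ∧
      reachCountB u es = (L.length : Int) := by
  have h0 : PySem.Set.ofList [u] = [u] := rfl
  unfold reachCountB
  rw [h0]
  refine reachLoopB_spec u es (2 * es.length + 2) [u] (by simp) (by simp) ?_ ?_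
  · intro x hx
    rw [show x = u by simpa using hx]
    exact Relation.ReflTransGen.refl
  · rw [length_candL]; omega

theorem counts_eq (s : Int) (vertices : List Int) (es : List (Int × Int))
    (hrange : ∀ e ∈ es, 0 ≤ e.1 ∧ e.1 < (vertices.length : Int) ∧ 0 ≤ e.2 ∧ e.2 < (vertices.length : Int))
    (hs : ∃ e ∈ es, e.1 = s ∨ e.2 = s) :
    DFScountA s vertices es = reachCountB s es := by
  obtain ⟨LA, hLAnd, hLAm, hLA⟩ := DFScountA_spec s vertices es hrange hs
  obtain ⟨LB, hLBnd, hLBm, hLB⟩ := reachCountB_spec s es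
  have : LA.Perm LB := (List.perm_ext_iff_of_nodup hLAnd hLBnd).2
    (fun a => by rw [hLAm, hLBm])
  rw [hLA, hLB, this.length_eq]

theorem case2_core (u : Int) (vertices : List Int) (edges E' : List (Int × Int))
    (hrange : ∀ e ∈ edges, 0 ≤ e.1 ∧ e.1 < (vertices.length : Int) ∧
      0 ≤ e.2 ∧ e.2 < (vertices.length : Int))
    (hend : ∃ e ∈ edges, e.1 = u ∨ e.2 = u)
    (hsub : ∀ e ∈ E', e ∈ edges) (hdegE' : 0 < degE u E') :
    (if DFScountA u vertices edges > DFScountA u vertices E' then false else true)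
      = decide (reachCountB u edges ≤ reachCountB u E') := by
  have hrange' : ∀ e ∈ E', 0 ≤ e.1 ∧ e.1 < (vertices.length : Int) ∧
      0 ≤ e.2 ∧ e.2 < (vertices.length : Int) := fun e he => hrange e (hsub e he)
  have hend' : ∃ e ∈ E', e.1 = u ∨ e.2 = u := by
    unfold degE at hdegE'
    have : 0 < E'.countP (fun e => e.1 == u) ∨ 0 < E'.countP (fun e => e.2 == u) := by omega
    rcases this with h | h
    · obtain ⟨e, he, hp⟩ := List.countP_pos_iff.1 h
      exact ⟨e, he, Or.inl (by simpa using hp)⟩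
    · obtain ⟨e, he, hp⟩ := List.countP_pos_iff.1 h
      exact ⟨e, he, Or.inr (by simpa using hp)⟩
  rw [counts_eq u vertices edges hrange hend, counts_eq u vertices E' hrange' hend']
  by_cases hab : reachCountB u edges ≤ reachCountB u E'
  · rw [if_neg (by omega), decide_eq_true hab]
  · rw [if_pos (by omega), decide_eq_false hab]

theorem degE_erase_self (l : List (Int × Int)) (u : Int) (h : (u, u) ∈ l) :
    degE u l ≤ degE u (l.erase (u, u)) + 2 := by
  have c1 := List.countP_erase (fun e => e.1 == u) l (u, u)
  have c2 := List.countP_erase (fun e => e.2 == u) l (u, u)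
  simp [h] at c1 c2
  unfold degE
  omega

theorem degE_erase_uv (l : List (Int × Int)) (u v : Int) (h : (u, v) ∈ l) (hne : v ≠ u) :
    degE u l ≤ degE u (l.erase (u, v)) + 1 := by
  have c1 := List.countP_erase (fun e => e.1 == u) l (u, v)
  have c2 := List.countP_erase (fun e => e.2 == u) l (u, v)
  simp [h, hne] at c1 c2
  unfold degE
  omega

theorem degE_erase_vu (l : List (Int × Int)) (u v : Int) (h : (v, u) ∈ l) (hne : v ≠ u) :
    degE u l ≤ degE u (l.erase (v, u)) + 1 := by
  have c1 := List.countP_erase (fun e => e.1 == u) l (v, u)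
  have c2 := List.countP_erase (fun e => e.2 == u) l (v, u)
  simp [h, hne] at c1 c2
  unfold degE
  omega

-- ===== VERDICT (by name: the statement is the Claim_ definition above) =====
theorem is_valid_nextEdge_spec : Claim_equal_is_valid_nextEdge := by
  intro u v vertices edges hdom hpre
  obtain ⟨hend, hcase2⟩ := hpre
  have hfold : ∀ (l : List (Int × Int)) (a : Int),
      l.foldl (fun acc e => acc + (if e.1 = u then (1 : Int) else 0)
          + (if e.2 = u then (1 : Int) else 0)) a
        = a + (l.countP (fun e => e.1 == u) : Int) + (l.countP (fun e => e.2 == u) : Int) := by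
    intro l
    induction l with
    | nil => intro a; simp
    | cons e t ih =>
      intro a
      rw [List.foldl_cons, ih, List.countP_cons, List.countP_cons]
      by_cases h1 : e.1 = u <;> by_cases h2 : e.2 = u <;>
        simp [h1, h2] <;> push_cast <;> ring
  have hpos : 0 < degE u edges := by
    obtain ⟨e, he, h⟩ := hend
    have : 0 < edges.countP (fun e => e.1 == u) ∨ 0 < edges.countP (fun e => e.2 == u) := by
      rcases h with h | h
      · exact Or.inl (List.countP_pos_iff.2 ⟨e, he, by simpa using h⟩)
      · exact Or.inr (List.countP_pos_iff.2 ⟨e, he, by simpa using h⟩)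
    unfold degE; omega
  unfold Spec_is_valid_nextEdge is_valid_nextEdge is_valid_nextEdge_alt
  simp only [beq_iff_eq, length_neighborA]
  rw [hfold]
  have hcast : ((0 : Int) + (edges.countP (fun e => e.1 == u) : Int)
      + (edges.countP (fun e => e.2 == u) : Int) = 1) ↔ degE u edges = 1 := by
    unfold degE; omega
  by_cases hd : degE u edges = 1
  · rw [if_pos hd, if_pos (hcast.2 hd)]
  · rw [if_neg hd, if_neg (fun h => hd (hcast.1 h))]
    obtain ⟨hrange, hedge, hself⟩ := hcase2 hd
    have h2le : 2 ≤ degE u edges := by omega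
    by_cases h0 : (u, v) ∈ edges
    · rw [if_pos h0, if_pos h0]
      refine case2_core u vertices edges _ hrange hend
        (fun e he => List.erase_subset he) ?_
      by_cases huv : u = v
      · subst huv
        have h3 : 3 ≤ degE u edges := hself rfl
        have hb := degE_erase_self edges u h0
        omega
      · have hb := degE_erase_uv edges u v h0 (fun hh => huv hh.symm)
        omega
    · have h1 : (v, u) ∈ edges := hedge.resolve_left h0
      have huv : u ≠ v := by
        intro hh
        exact h0 (hh ▸ (hh ▸ h1))
      rw [if_neg h0, if_neg h0, if_pos h1]
      refine case2_core u vertices edges _ hrange hend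
        (fun e he => List.erase_subset he) ?_
      have hb := degE_erase_vu edges u v h1 (fun hh => huv hh.symm)
      omega
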